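-- pv_equiv track=rewrite | github.com/cdl-saarland/MemInstrument-Runtime | softbound/src/tools/filter_unwrapped.py | filter_known_lib_functions
-- ===== SOURCE A (Python) =====
-- from collections import defaultdict
--
-- KnownLibs = ["GLIBC", "OPENSSL", "UUID"]
--
-- def split_into_lib_and_name(symbol):
--     """
--     Split the given string into the library name and the function name.
--     The library name will be empty if the function is not defined in a library.
--     """
--     lib_identifier = "@@"
--     if not lib_identifier in symbol:
--         return (symbol.strip(), None)
--
--     trimmed = symbol.split(lib_identifier)
--     assert len(trimmed) == 2
--
--     return (trimmed[0].strip(), trimmed[1].strip())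
--
-- def filter_known_lib_functions(undefined_symbols):
--     """
--     Generate a list of all functions in libraries and a mapping from library to
--     all encountered functions that belong to that library.
--     """
--     known_lib_functions = set()
--     known_functions_per_lib = defaultdict(list)
--
--     for symbols in undefined_symbols.values():
--         for symbol in symbols:
--             fun_name, lib_name = split_into_lib_and_name(symbol)
--             if not lib_name:
--                 continue
--             for known_lib in KnownLibs:
--                 if known_lib in lib_name:
--                     known_lib_functions.add(fun_name)
--                     known_functions_per_lib[known_lib].append(fun_name)
--
--     return known_lib_functions, known_functions_per_lib
-- ===== SOURCE B (Python) =====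
-- from collections import defaultdict
--
-- KnownLibs = ["GLIBC", "OPENSSL", "UUID"]
--
-- def split_into_lib_and_name(symbol):
--     """
--     Split the given string into the library name and the function name.
--     The library name will be empty if the function is not defined in a library.
--     """
--     lib_identifier = "@@"
--     if not lib_identifier in symbol:
--         return (symbol.strip(), None)
--
--     trimmed = symbol.split(lib_identifier)
--     assert len(trimmed) == 2
--
--     return (trimmed[0].strip(), trimmed[1].strip())
--
-- def filter_known_lib_functions(undefined_symbols):
--     """
--     Three staged passes instead of one fused triple loop:
--     (1) flatten and split every symbol once;
--     (2) build, once per DISTINCT library name, an index of the known libs it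
--         matches (library version strings repeat, so each substring scan runs
--         once per distinct name, not once per symbol);
--     (3) replay the (fun_name, lib_name) stream against that index.
--     """
--     pairs = [split_into_lib_and_name(symbol)
--              for symbols in undefined_symbols.values() for symbol in symbols]
--
--     libs_for = {}
--     for _, lib_name in pairs:
--         if lib_name and lib_name not in libs_for:
--             libs_for[lib_name] = [kl for kl in KnownLibs if kl in lib_name]
--
--     known_lib_functions = set()
--     known_functions_per_lib = defaultdict(list)
--     for fun_name, lib_name in pairs:
--         if lib_name:
--             for kl in libs_for[lib_name]:
--                 known_lib_functions.add(fun_name)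
--                 known_functions_per_lib[kl].append(fun_name)
--
--     return known_lib_functions, known_functions_per_lib
-- ===== Notes on version B (the rewrite author's own statement) =====
-- stated objective: alternative
-- what changed: Replaces A's fused triple loop (per symbol, scan all KnownLibs with a substring test, updating set and dict in lockstep) by three staged passes with a new data structure: flatten+split once, build a match index keyed by each DISTINCT library name (one KnownLibs substring scan per distinct name), then replay the pair stream with a single index lookup per symbol.
import Mathlib
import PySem

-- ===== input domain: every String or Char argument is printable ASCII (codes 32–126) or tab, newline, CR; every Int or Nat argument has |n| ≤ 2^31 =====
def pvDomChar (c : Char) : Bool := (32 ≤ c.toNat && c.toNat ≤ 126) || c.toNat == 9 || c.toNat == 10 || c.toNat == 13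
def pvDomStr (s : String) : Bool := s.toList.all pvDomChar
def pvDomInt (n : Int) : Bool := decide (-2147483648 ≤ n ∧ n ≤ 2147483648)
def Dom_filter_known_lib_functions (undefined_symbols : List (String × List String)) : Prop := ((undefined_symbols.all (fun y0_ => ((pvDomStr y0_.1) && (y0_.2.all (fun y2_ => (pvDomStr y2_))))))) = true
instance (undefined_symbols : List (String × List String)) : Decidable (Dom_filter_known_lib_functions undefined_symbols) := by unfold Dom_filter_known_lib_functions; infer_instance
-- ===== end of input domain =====

-- B replaces A's fused triple loop by staged passes with a match index built once per
-- distinct library name (objective: alternative; return values proved equal on Pre_).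

-- ===== PORT A =====
def KnownLibsL : List String := ["GLIBC", "OPENSSL", "UUID"]

-- shared module helper (identical in Source A and Source B): on the assert-failing path
-- (more than one "@@", excluded by Pre_) Python raises; the port's value there is irrelevant.
def split_into_lib_and_name (symbol : String) : String × Option String :=
  if !(PySem.Str.isIn "@@" symbol) then (PySem.Str.strip symbol, none)
  else
    let trimmed := (PySem.Str.split? symbol "@@").getD []
    (PySem.Str.strip (trimmed.getD 0 ""), some (PySem.Str.strip (trimmed.getD 1 "")))

def filter_known_lib_functions (undefined_symbols : List (String × List String)) : List String × (List (String × List String)) :=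
  let res := undefined_symbols.foldl
    (fun (acc : PySem.Set String × PySem.Dict String (List String)) kv =>
      kv.2.foldl
        (fun acc symbol =>
          let p := split_into_lib_and_name symbol
          match p.2 with
          | none => acc
          | some lib_name =>
            if lib_name = "" then acc
            else
              KnownLibsL.foldl
                (fun acc known_lib =>
                  if PySem.Str.isIn known_lib lib_name then
                    (PySem.Set.add acc.1 p.1,
                     acc.2.insert known_lib (acc.2.getD known_lib [] ++ [p.1]))
                  else acc)
                acc)
        acc)
    ((PySem.Set.empty, PySem.Dict.empty) : PySem.Set String × PySem.Dict String (List String))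
  (res.1, res.2.items)

-- ===== PORT B =====
-- stage 2 of Source B: the match index over distinct library names
def buildLibsFor (pairs : List (String × Option String)) : PySem.Dict String (List String) :=
  pairs.foldl
    (fun (d : PySem.Dict String (List String)) p =>
      match p.2 with
      | none => d
      | some lib_name =>
        if lib_name = "" then d
        else if d.contains lib_name then d
        else d.insert lib_name (KnownLibsL.filter (fun kl => PySem.Str.isIn kl lib_name)))
    PySem.Dict.empty

def filter_known_lib_functions_alt (undefined_symbols : List (String × List String)) : List String × (List (String × List String)) :=
  let pairs := (undefined_symbols.flatMap (fun kv => kv.2)).map split_into_lib_and_name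
  let libs_for := buildLibsFor pairs
  let res := pairs.foldl
    (fun (acc : PySem.Set String × PySem.Dict String (List String)) p =>
      match p.2 with
      | none => acc
      | some lib_name =>
        if lib_name = "" then acc
        else
          (libs_for.getD lib_name []).foldl
            (fun acc kl =>
              (PySem.Set.add acc.1 p.1,
               acc.2.insert kl (acc.2.getD kl [] ++ [p.1])))
            acc)
    ((PySem.Set.empty, PySem.Dict.empty) : PySem.Set String × PySem.Dict String (List String))
  (res.1, res.2.items)

-- ===== PRECONDITION & SPEC =====
-- Pre_ excludes symbols containing "@@" more than once: on those the helper's assert raises AssertionError.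
def Pre_filter_known_lib_functions (undefined_symbols : List (String × List String)) : Prop :=
  (undefined_symbols.all (fun kv => kv.2.all (fun s => PySem.Str.count s "@@" ≤ 1))) = true
instance (undefined_symbols : List (String × List String)) : Decidable (Pre_filter_known_lib_functions undefined_symbols) := by unfold Pre_filter_known_lib_functions; infer_instance

def pvWitness_filter_known_lib_functions : (List (String × List String)) :=
  [("mod.o", ["read@@GLIBC_2.2", "local", "ssl_new@@OPENSSL_1_1"])]

def Spec_filter_known_lib_functions (undefined_symbols : List (String × List String)) (out : List String × (List (String × List String))) : Prop := out = filter_known_lib_functions_alt undefined_symbols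
instance (undefined_symbols : List (String × List String)) (out : List String × (List (String × List String))) : Decidable (Spec_filter_known_lib_functions undefined_symbols out) := by unfold Spec_filter_known_lib_functions; infer_instance

-- ===== CLAIM (what is proved, stated in full; the proofs are below) =====
def Claim_equal_filter_known_lib_functions : Prop := ∀ (undefined_symbols : List (String × List String)), Dom_filter_known_lib_functions undefined_symbols → Pre_filter_known_lib_functions undefined_symbols → Spec_filter_known_lib_functions undefined_symbols (filter_known_lib_functions undefined_symbols)

-- ===== LEMMAS AND PROOFS =====

def matchLibs (lib_name : String) : List String :=
  KnownLibsL.filter (fun kl => PySem.Str.isIn kl lib_name)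

-- every value stored in the index is the KnownLibs filter of its key
def GoodIdx (d : PySem.Dict String (List String)) : Prop :=
  ∀ lib v, d.get? lib = some v → v = matchLibs lib

def idxStep (d : PySem.Dict String (List String)) (p : String × Option String) :
    PySem.Dict String (List String) :=
  match p.2 with
  | none => d
  | some lib_name =>
    if lib_name = "" then d
    else if d.contains lib_name then d
    else d.insert lib_name (KnownLibsL.filter (fun kl => PySem.Str.isIn kl lib_name))

lemma buildLibsFor_eq (pairs : List (String × Option String)) :
    buildLibsFor pairs = pairs.foldl idxStep PySem.Dict.empty := rfl

lemma goodIdx_step (d : PySem.Dict String (List String)) (p : String × Option String)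
    (hd : GoodIdx d) : GoodIdx (idxStep d p) := by
  unfold idxStep
  cases p.2 with
  | none => exact hd
  | some lib =>
    by_cases h0 : lib = ""
    · simpa [h0] using hd
    · by_cases hc : d.contains lib
      · simpa [h0, hc] using hd
      · simp only [h0, hc, if_false, Bool.false_eq_true]
        intro k v hget
        rw [PySem.Dict.get?_insert] at hget
        by_cases hk : k = lib
        · simp [hk] at hget; simp [hk, ← hget, matchLibs]
        · rw [if_neg hk] at hget; exact hd k v hget

lemma goodIdx_fold (pairs : List (String × Option String))
    (d : PySem.Dict String (List String)) (hd : GoodIdx d) :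
    GoodIdx (pairs.foldl idxStep d) := by
  induction pairs generalizing d with
  | nil => exact hd
  | cons p rest ih => exact ih _ (goodIdx_step d p hd)

lemma contains_idxStep (d : PySem.Dict String (List String)) (p : String × Option String)
    (k : String) (hc : d.contains k = true) : (idxStep d p).contains k = true := by
  unfold idxStep
  cases p.2 with
  | none => exact hc
  | some lib =>
    by_cases h0 : lib = ""
    · simpa [h0] using hc
    · by_cases hcl : d.contains lib
      · simpa [h0, hcl] using hc
      · simp [h0, hcl, PySem.Dict.contains_insert, hc]

lemma contains_fold_mono (pairs : List (String × Option String))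
    (d : PySem.Dict String (List String)) (k : String) (hc : d.contains k = true) :
    (pairs.foldl idxStep d).contains k = true := by
  induction pairs generalizing d with
  | nil => exact hc
  | cons p rest ih => exact ih _ (contains_idxStep d p k hc)

lemma contains_fold_of_mem (pairs : List (String × Option String))
    (d : PySem.Dict String (List String)) (p : String × Option String)
    (hp : p ∈ pairs) (lib : String) (hlib : p.2 = some lib) (h0 : lib ≠ "") :
    (pairs.foldl idxStep d).contains lib = true := by
  induction pairs generalizing d with
  | nil => cases hp
  | cons q rest ih =>
    rw [List.foldl_cons]
    rcases List.mem_cons.mp hp with rfl | hmem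
    · apply contains_fold_mono
      unfold idxStep
      rw [hlib]
      by_cases hc : d.contains lib
      · simp [h0, hc]
      · simp [h0, hc, PySem.Dict.contains_insert_self]
    · exact ih _ hmem

lemma buildLibsFor_getD (pairs : List (String × Option String))
    (p : String × Option String) (hp : p ∈ pairs) (lib : String)
    (hlib : p.2 = some lib) (h0 : lib ≠ "") :
    (buildLibsFor pairs).getD lib [] = matchLibs lib := by
  rw [buildLibsFor_eq]
  have hc := contains_fold_of_mem pairs PySem.Dict.empty p hp lib hlib h0
  have hgood := goodIdx_fold pairs PySem.Dict.empty (by intro k v h; simp [PySem.Dict.get?_empty] at h)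
  rw [PySem.Dict.contains_eq_isSome_get?] at hc
  cases hv : (pairs.foldl idxStep PySem.Dict.empty).get? lib with
  | none => rw [hv] at hc; simp at hc
  | some v =>
    rw [PySem.Dict.getD_eq_get?_getD, hv]
    exact hgood lib v hv

-- A's inner scan over KnownLibs equals the unconditional fold over the filtered list
lemma inner_scan_eq (lib f : String) (acc : PySem.Set String × PySem.Dict String (List String)) :
    KnownLibsL.foldl
      (fun (acc : PySem.Set String × PySem.Dict String (List String)) known_lib =>
        if PySem.Str.isIn known_lib lib then
          (PySem.Set.add acc.1 f, acc.2.insert known_lib (acc.2.getD known_lib [] ++ [f]))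
        else acc)
      acc
    = (matchLibs lib).foldl
        (fun acc kl => (PySem.Set.add acc.1 f, acc.2.insert kl (acc.2.getD kl [] ++ [f])))
        acc := by
  exact PySem.List.foldl_if_eq_foldl_filter _ _ _ _

lemma pair_items_congr (a b : PySem.Set String × PySem.Dict String (List String))
    (h : a = b) : (a.1, a.2.items) = (b.1, b.2.items) := by rw [h]

-- A's nested loops over the dict values are one loop over the flattened symbol stream
lemma nested_foldl_eq {α : Type} (u : List (String × List String))
    (g : α → String → α) (init : α) :
    u.foldl (fun acc kv => kv.2.foldl g acc) init
      = (u.flatMap (fun kv => kv.2)).foldl g init := by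
  induction u generalizing init with
  | nil => rfl
  | cons kv rest ih => simp [List.flatMap_cons, List.foldl_append, ih]

-- ===== VERDICT (by name: the statement is the Claim_ definition above) =====
theorem filter_known_lib_functions_spec : Claim_equal_filter_known_lib_functions := by
  intro undefined_symbols _ _
  unfold Spec_filter_known_lib_functions filter_known_lib_functions filter_known_lib_functions_alt
  dsimp only
  rw [nested_foldl_eq]
  rw [List.foldl_map]
  apply pair_items_congr
  apply PySem.List.foldl_congr_mem
  intro acc symbol hs
  have hp : split_into_lib_and_name symbol ∈
      (undefined_symbols.flatMap (fun kv => kv.2)).map split_into_lib_and_name :=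
    List.mem_map_of_mem hs
  cases hlib : (split_into_lib_and_name symbol).2 with
  | none => simp
  | some lib =>
    by_cases h0 : lib = ""
    · simp [h0]
    · simp only [h0, if_false]
      rw [inner_scan_eq, buildLibsFor_getD _ _ hp _ hlib h0]
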